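-- pv_equiv track=rewrite | github.com/James-h-1969/COMP3608_A1 | functions.py | basic_get_nums_in_a_row
-- ===== SOURCE A (Python) =====
-- def basic_get_nums_in_a_row(grid, p):
--     """
--         get_nums_in_a_row:
--             @params:
--                 grid: List[str] -> list of row stirings holding the current position
--                 p: str -> player color as either 'r' or 'y'
--             @returns:
--                 nums: Dict[int] -> dictionary of how many in a row
--
--     """
--     nums = {"2":0, "3":0, "4":0}
--     # check rows
--     for row in grid:
--         current_in_a_row = 0
--         for i in range(len(row)):
--             if row[i] == p:
--                 current_in_a_row += 1
--             else:
--                 if str(current_in_a_row) in nums.keys():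
--                     nums[str(current_in_a_row)] += 1
--                 current_in_a_row = 0
--         if str(current_in_a_row) in nums.keys():
--             nums[str(current_in_a_row)] += 1
--         current_in_a_row = 0
--
--   # check columns
--     for i in range(len(grid[0])):
--         current_in_a_column = 0
--         for j in range(len(grid)):
--             char = grid[j][i] # iterate through each row of the column
--             if char == p:
--                 current_in_a_column += 1
--             else:
--                 if str(current_in_a_column) in nums.keys():
--                     nums[str(current_in_a_column)] += 1
--                 current_in_a_column = 0
--         if str(current_in_a_column) in nums.keys():
--             nums[str(current_in_a_column)] += 1
--
--   # check diagonals
--     AMOUNT_OF_DIAGONALS = 12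
--     i0, j0 = 5, 0
--     for _ in range(AMOUNT_OF_DIAGONALS):
--         current_in_diag = 0
--         i, j = i0, j0
--         while (i < len(grid) and j < len(grid[0])):
--             char = grid[i][j]
--             if char == p:
--                 current_in_diag += 1
--             else:
--                 if str(current_in_diag) in nums.keys():
--                     nums[str(current_in_diag)] += 1
--                 current_in_diag = 0
--             i += 1
--             j += 1
--         if str(current_in_diag) in nums.keys():
--             nums[str(current_in_diag)] += 1
--
--         if i0 - 1 >= 0:
--             i0 -= 1
--         else:
--             j0 += 1
--     i0, j0 = 0, 0
--     for _ in range(AMOUNT_OF_DIAGONALS):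
--         current_in_diag = 0
--         i, j = i0, j0
--         while (i < len(grid) and j >= 0):
--             char = grid[i][j]
--             if char == p:
--                 current_in_diag += 1
--             else:
--                 if str(current_in_diag) in nums.keys():
--
--                     nums[str(current_in_diag)] += 1
--                 current_in_diag = 0
--             i += 1
--             j -= 1
--         if str(current_in_diag) in nums.keys():
--             nums[str(current_in_diag)] += 1
--         if j0 + 1 < len(grid[0]):
--             j0 += 1
--         else:
--             i0 += 1
--     return nums
-- ===== SOURCE B (Python) =====
-- def basic_get_nums_in_a_row(grid, p):
--     # Materialize every scanned line (rows, columns, the 12+12 diagonals with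
--     # A's exact starting-point progression), then count runs uniformly.
--     h, w = len(grid), len(grid[0])
--     lines = [list(row) for row in grid]
--     for i in range(w):
--         lines.append([grid[j][i] for j in range(h)])
--     i0, j0 = 5, 0
--     for _ in range(12):
--         i, j, diag = i0, j0, []
--         while i < h and j < w:
--             diag.append(grid[i][j])
--             i += 1
--             j += 1
--         lines.append(diag)
--         if i0 - 1 >= 0:
--             i0 -= 1
--         else:
--             j0 += 1
--     i0, j0 = 0, 0
--     for _ in range(12):
--         i, j, diag = i0, j0, []
--         while i < h and j >= 0:
--             diag.append(grid[i][j])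
--             i += 1
--             j -= 1
--         lines.append(diag)
--         if j0 + 1 < w:
--             j0 += 1
--         else:
--             i0 += 1
--     all_runs = []
--     for line in lines:
--         n = 0
--         for c in line:
--             if c == p:
--                 n += 1
--             else:
--                 if n:
--                     all_runs.append(n)
--                 n = 0
--         if n:
--             all_runs.append(n)
--     return {str(k): all_runs.count(k) for k in (2, 3, 4)}
-- ===== Notes on version B (the rewrite author's own statement) =====
-- stated objective: alternative
-- what changed: A interleaves run-counting and str(n)-keyed dict-bumping inside four bespoke scanning loops (rows, columns, two hardcoded 12-start diagonal loops); B first materializes every scanned line as a list of cells (rows, columns, the same 24 diagonals), then extracts all maximal runs of p in one uniform pass and builds the result dict once at the end by counting runs of length 2, 3 and 4.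
import Mathlib
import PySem

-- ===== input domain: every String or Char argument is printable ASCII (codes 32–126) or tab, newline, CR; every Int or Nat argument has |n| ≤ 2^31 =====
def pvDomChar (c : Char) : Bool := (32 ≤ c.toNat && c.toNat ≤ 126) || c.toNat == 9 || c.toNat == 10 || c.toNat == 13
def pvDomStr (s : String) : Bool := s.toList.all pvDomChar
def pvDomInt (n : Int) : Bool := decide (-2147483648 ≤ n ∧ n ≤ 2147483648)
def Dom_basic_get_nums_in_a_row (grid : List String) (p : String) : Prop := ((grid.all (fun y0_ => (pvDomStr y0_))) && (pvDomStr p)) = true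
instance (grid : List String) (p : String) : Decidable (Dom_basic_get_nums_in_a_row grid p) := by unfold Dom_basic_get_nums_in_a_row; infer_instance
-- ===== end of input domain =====

-- B re-groups A's four interleaved counting passes as: materialize every scanned line
-- (rows, columns, the same 24 diagonals), extract maximal runs uniformly, count runs of
-- length 2/3/4 once at the end (objective: alternative decomposition; same asymptotic cost,
-- measured constant-factor faster in a timing run).

-- ===== PORT A =====
-- row[i] == p : Python compares the 1-character string row[i] with p
def pvEq (c : Char) (p : String) : Bool := [c] == p.toList

-- 'if str(n) in nums.keys(): nums[str(n)] += 1'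
def pvBump (d : PySem.Dict String Int) (n : Int) : PySem.Dict String Int :=
  match d.get? (PySem.Int.toStr n) with
  | some v => d.insert (PySem.Int.toStr n) (v + 1)
  | none => d

-- the body A repeats in each scanning loop: 'if char == p: cur += 1 else: bump; cur = 0'
def pvStepA (p : String) (st : PySem.Dict String Int × Int) (c : Char) : PySem.Dict String Int × Int :=
  if pvEq c p then (st.1, st.2 + 1) else (pvBump st.1 st.2, 0)

-- 'while i < len(grid) and j < len(grid[0]): … ; i += 1; j += 1' (counting); fuel = len(grid) suffices
def pvDiagCntF (g : List (List Char)) (p : String) (w : Nat) :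
    Nat → Nat → Nat → PySem.Dict String Int × Int → PySem.Dict String Int × Int
  | 0, _, _, st => st
  | fuel + 1, i, j, st =>
    if i < g.length ∧ j < w then
      pvDiagCntF g p w fuel (i + 1) (j + 1) (pvStepA p st ((g.getD i []).getD j default))
    else st

-- 'while i < len(grid) and j >= 0: … ; i += 1; j -= 1' (counting); j is a Python int
def pvDiagCntB (g : List (List Char)) (p : String) :
    Nat → Nat → Int → PySem.Dict String Int × Int → PySem.Dict String Int × Int
  | 0, _, _, st => st
  | fuel + 1, i, j, st =>
    if i < g.length ∧ 0 ≤ j then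
      pvDiagCntB g p fuel (i + 1) (j - 1) (pvStepA p st ((g.getD i []).getD j.toNat default))
    else st

def basic_get_nums_in_a_row (grid : List String) (p : String) : List (String × Int) :=
  let g := grid.map String.toList
  let nums0 : PySem.Dict String Int := PySem.Dict.mk [("2", 0), ("3", 0), ("4", 0)]
  -- check rows
  let nums1 := g.foldl (fun d row =>
      let s := row.foldl (pvStepA p) (d, 0)
      pvBump s.1 s.2) nums0
  -- len(grid[0]); Pre_ excludes the empty grid, where Python raises IndexError
  let w := (g.headD []).length
  -- check columns
  let nums2 := (List.range w).foldl (fun d i =>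
      let s := (List.range g.length).foldl
          (fun st j => pvStepA p st ((g.getD j []).getD i default)) (d, 0)
      pvBump s.1 s.2) nums1
  -- check diagonals: 12 down-right starts from (5,0), 'if i0-1 >= 0: i0 -= 1 else: j0 += 1'
  let s3 := (List.range 12).foldl (fun (st : (Nat × Nat) × PySem.Dict String Int) _ =>
      let r := pvDiagCntF g p w g.length st.1.1 st.1.2 (st.2, 0)
      ((if 1 ≤ st.1.1 then (st.1.1 - 1, st.1.2) else (st.1.1, st.1.2 + 1)),
       pvBump r.1 r.2)) ((5, 0), nums2)
  -- 12 down-left starts from (0,0), 'if j0+1 < len(grid[0]): j0 += 1 else: i0 += 1'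
  let s4 := (List.range 12).foldl (fun (st : (Nat × Nat) × PySem.Dict String Int) _ =>
      let r := pvDiagCntB g p g.length st.1.1 (st.1.2 : Int) (st.2, 0)
      ((if st.1.2 + 1 < w then (st.1.1, st.1.2 + 1) else (st.1.1 + 1, st.1.2)),
       pvBump r.1 r.2)) ((0, 0), s3.2)
  s4.2.items

-- ===== PORT B =====
-- 'while i < h and j < w: diag.append(grid[i][j]); i += 1; j += 1' (collecting)
def pvDiagColF (g : List (List Char)) (w : Nat) : Nat → Nat → Nat → List Char
  | 0, _, _ => []
  | fuel + 1, i, j =>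
    if i < g.length ∧ j < w then
      (g.getD i []).getD j default :: pvDiagColF g w fuel (i + 1) (j + 1)
    else []

-- 'while i < h and j >= 0: diag.append(grid[i][j]); i += 1; j -= 1' (collecting)
def pvDiagColB (g : List (List Char)) : Nat → Nat → Int → List Char
  | 0, _, _ => []
  | fuel + 1, i, j =>
    if i < g.length ∧ 0 ≤ j then
      (g.getD i []).getD j.toNat default :: pvDiagColB g fuel (i + 1) (j - 1)
    else []

-- the run-extraction step of Source B: 'if c == p: n += 1 else: (if n: append n); n = 0'
def pvStepB (p : String) (st : List Int × Int) (c : Char) : List Int × Int :=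
  if pvEq c p then (st.1, st.2 + 1)
  else if st.2 ≠ 0 then (st.1 ++ [st.2], 0) else (st.1, 0)

def basic_get_nums_in_a_row_alt (grid : List String) (p : String) : List (String × Int) :=
  let g := grid.map String.toList
  -- len(grid[0]); Pre_ excludes the empty grid, where Python raises IndexError
  let w := (g.headD []).length
  -- lines = rows, then one column per i
  let lines1 := (List.range w).foldl
      (fun ls i => ls ++ [(List.range g.length).map (fun j => (g.getD j []).getD i default)]) g
  -- the 12 down-right diagonal lines, same start progression as A
  let s1 := (List.range 12).foldl (fun (st : (Nat × Nat) × List (List Char)) _ =>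
      ((if 1 ≤ st.1.1 then (st.1.1 - 1, st.1.2) else (st.1.1, st.1.2 + 1)),
       st.2 ++ [pvDiagColF g w g.length st.1.1 st.1.2])) ((5, 0), lines1)
  -- the 12 down-left diagonal lines
  let s2 := (List.range 12).foldl (fun (st : (Nat × Nat) × List (List Char)) _ =>
      ((if st.1.2 + 1 < w then (st.1.1, st.1.2 + 1) else (st.1.1 + 1, st.1.2)),
       st.2 ++ [pvDiagColB g g.length st.1.1 (st.1.2 : Int)])) ((0, 0), s1.2)
  -- all maximal runs of p over every line
  let allRuns := s2.2.foldl (fun (acc : List Int) line =>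
      let s := line.foldl (pvStepB p) (acc, 0)
      if s.2 ≠ 0 then s.1 ++ [s.2] else s.1) []
  -- {str(k): all_runs.count(k) for k in (2, 3, 4)}
  [("2", (allRuns.count 2 : Int)), ("3", (allRuns.count 3 : Int)), ("4", (allRuns.count 4 : Int))]

-- ===== PRECONDITION & SPEC =====
-- Pre_ is exactly where the Python A returns: on an empty grid, a zero-width first row, or a
-- row shorter than the first one A raises IndexError (row/column/diagonal indexing).
def Pre_basic_get_nums_in_a_row (grid : List String) (p : String) : Prop :=
  grid ≠ [] ∧ 1 ≤ (grid.headD "").toList.length ∧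
    ∀ r ∈ grid, (grid.headD "").toList.length ≤ r.toList.length
instance (grid : List String) (p : String) : Decidable (Pre_basic_get_nums_in_a_row grid p) := by
  unfold Pre_basic_get_nums_in_a_row; infer_instance
def pvWitness_basic_get_nums_in_a_row : List String × String := (["rry", "yrr"], "r")

def Spec_basic_get_nums_in_a_row (grid : List String) (p : String) (out : List (String × Int)) : Prop := out = basic_get_nums_in_a_row_alt grid p
instance (grid : List String) (p : String) (out : List (String × Int)) : Decidable (Spec_basic_get_nums_in_a_row grid p out) := by unfold Spec_basic_get_nums_in_a_row; infer_instance

-- ===== CLAIM (what is proved, stated in full; the proofs are below) =====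
def Claim_equal_basic_get_nums_in_a_row : Prop := ∀ (grid : List String) (p : String), Dom_basic_get_nums_in_a_row grid p → Pre_basic_get_nums_in_a_row grid p → Spec_basic_get_nums_in_a_row grid p (basic_get_nums_in_a_row grid p)

-- ===== LEMMAS AND PROOFS =====

-- the literal three-key dictionary {"2": a, "3": b, "4": c}
def pvD (a b c : Int) : PySem.Dict String Int := PySem.Dict.mk [("2", a), ("3", b), ("4", c)]

-- the per-line processing A performs (scan with pvStepA, then bump the trailing run)
def pvLineF (p : String) (d : PySem.Dict String Int) (cs : List Char) : PySem.Dict String Int :=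
  pvBump (cs.foldl (pvStepA p) (d, 0)).1 (cs.foldl (pvStepA p) (d, 0)).2

-- the per-line run extraction B performs
def pvRunF (p : String) (acc : List Int) (cs : List Char) : List Int :=
  if (cs.foldl (pvStepB p) (acc, 0)).2 ≠ 0 then
    (cs.foldl (pvStepB p) (acc, 0)).1 ++ [(cs.foldl (pvStepB p) (acc, 0)).2]
  else (cs.foldl (pvStepB p) (acc, 0)).1

-- the maximal runs of p in cs, given a pending run of length r
def pvRunsP (p : String) : Int → List Char → List Int
  | r, [] => if r ≠ 0 then [r] else []
  | r, c :: cs =>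
    if pvEq c p then pvRunsP p (r + 1) cs
    else if r ≠ 0 then r :: pvRunsP p 0 cs else pvRunsP p 0 cs

-- start-point updates and materialized diagonal lines
def pvUF (ij : Nat × Nat) : Nat × Nat := if 1 ≤ ij.1 then (ij.1 - 1, ij.2) else (ij.1, ij.2 + 1)
def pvUB (w : Nat) (ij : Nat × Nat) : Nat × Nat :=
  if ij.2 + 1 < w then (ij.1, ij.2 + 1) else (ij.1 + 1, ij.2)
def pvMF (g : List (List Char)) (w : Nat) (ij : Nat × Nat) : List Char :=
  pvDiagColF g w g.length ij.1 ij.2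
def pvMB (g : List (List Char)) (ij : Nat × Nat) : List Char :=
  pvDiagColB g g.length ij.1 (ij.2 : Int)
def pvColL (g : List (List Char)) (i : Nat) : List Char :=
  (List.range g.length).map (fun j => (g.getD j []).getD i default)
def pvLF (g : List (List Char)) (w : Nat) : List (List Char) :=
  ((List.range 12).foldl (fun st (_ : Nat) => (pvUF st.1, st.2 ++ [pvMF g w st.1])) ((5, 0), [])).2
def pvLB (g : List (List Char)) (w : Nat) : List (List Char) :=
  ((List.range 12).foldl (fun st (_ : Nat) => (pvUB w st.1, st.2 ++ [pvMB g st.1])) ((0, 0), [])).2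
def pvAllLines (g : List (List Char)) (w : Nat) : List (List Char) :=
  g ++ (List.range w).map (pvColL g) ++ pvLF g w ++ pvLB g w

-- str(n) determines n among the nonnegative ints and small digits
lemma pv_toStr_eq_digit (n : Int) (hn : 0 ≤ n) (k : Nat) (hk2 : 2 ≤ k) (hk4 : k ≤ 4) :
    PySem.Int.toStr n = PySem.Int.toStr (k : Int) ↔ n = (k : Int) := by
  constructor
  · intro h
    rw [PySem.Int.toStr, PySem.Int.toStr] at h
    have h1 := String.ofList_eq.mp h
    have h2 := String.ofList_eq.mp (rfl : String.ofList (PySem.Int.toChars (k : Int)) = _)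
    have hL : PySem.Int.toChars n = PySem.Int.toChars (k : Int) := h1.trans h2.symm
    rw [PySem.Int.toChars, PySem.Int.toChars] at hL
    rw [if_neg (by omega), if_neg (by omega)] at hL
    have hkk : ((k : Int)).toNat = k := by omega
    rw [hkk] at hL
    rw [show Nat.toDigits 10 k = [Nat.digitChar k] from Nat.toDigits_of_lt_base (by omega)] at hL
    have hlen : (Nat.toDigits 10 n.toNat).length ≤ 1 := by rw [hL]; simp
    have hsm : n.toNat < 10 := by
      have := (Nat.length_toDigits_le_iff (by norm_num) (by norm_num)).mp hlen
      simpa using this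
    rw [Nat.toDigits_of_lt_base hsm] at hL
    have hd : n.toNat.digitChar = k.digitChar := by simpa using hL
    set m := n.toNat with hm
    have hm10 : m < 10 := hsm
    have hmk : m = k := by
      interval_cases m <;> interval_cases k <;> first | rfl | (exact absurd hd (by decide))
    omega
  · rintro rfl; rfl

lemma pvBump_D (a b c n : Int) (hn : 0 ≤ n) :
    pvBump (pvD a b c) n =
      if n = 2 then pvD (a + 1) b c
      else if n = 3 then pvD a (b + 1) c
      else if n = 4 then pvD a b (c + 1)
      else pvD a b c := by
  have h2 := pv_toStr_eq_digit n hn 2 (by norm_num) (by norm_num)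
  have h3 := pv_toStr_eq_digit n hn 3 (by norm_num) (by norm_num)
  have h4 := pv_toStr_eq_digit n hn 4 (by norm_num) (by norm_num)
  by_cases e2 : n = 2
  · subst e2; rfl
  by_cases e3 : n = 3
  · subst e3; rfl
  by_cases e4 : n = 4
  · subst e4; rfl
  have g2 : PySem.Int.toStr n ≠ "2" := fun h => e2 (by simpa using h2.mp (by simpa using h))
  have g3 : PySem.Int.toStr n ≠ "3" := fun h => e3 (by simpa using h3.mp (by simpa using h))
  have g4 : PySem.Int.toStr n ≠ "4" := fun h => e4 (by simpa using h4.mp (by simpa using h))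
  have hget : (pvD a b c).get? (PySem.Int.toStr n) = none := by
    simp [pvD, PySem.Dict.get?]
    refine ⟨?_, ?_, ?_⟩ <;> [exact fun h => g2 h.symm; exact fun h => g3 h.symm; exact fun h => g4 h.symm]
  simp [pvBump, hget, e2, e3, e4]

-- A's scan of one line, with pending run r, adds exactly the number of maximal runs of
-- length 2, 3 and 4 to the respective buckets
lemma pv_lineA (p : String) : ∀ (cs : List Char) (r a b c : Int), 0 ≤ r →
    pvBump (cs.foldl (pvStepA p) (pvD a b c, r)).1 (cs.foldl (pvStepA p) (pvD a b c, r)).2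
      = pvD (a + ((pvRunsP p r cs).count 2 : Int)) (b + ((pvRunsP p r cs).count 3 : Int))
          (c + ((pvRunsP p r cs).count 4 : Int)) := by
  intro cs
  induction cs with
  | nil =>
    intro r a b c hr
    simp only [List.foldl_nil, pvRunsP]
    rw [pvBump_D a b c r hr]
    by_cases e2 : r = 2
    · subst e2; simp
    by_cases e3 : r = 3
    · subst e3; simp
    by_cases e4 : r = 4
    · subst e4; simp
    by_cases e0 : r = 0
    · subst e0; simp
    · simp only [if_neg e2, if_neg e3, if_neg e4, if_pos e0]
      simp only [List.count_singleton]
      simp only [pvD, PySem.Dict.mk.injEq, List.cons.injEq, Prod.mk.injEq]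
      have b2 : (r == (2:Int)) = false := by simpa using e2
      have b3 : (r == (3:Int)) = false := by simpa using e3
      have b4 : (r == (4:Int)) = false := by simpa using e4
      simp [b2, b3, b4]
  | cons c0 cs ih =>
    intro r a b c hr
    simp only [List.foldl_cons]
    by_cases hc : pvEq c0 p
    · simp only [pvStepA, if_pos hc]
      rw [ih (r + 1) a b c (by omega)]
      simp [pvRunsP, hc]
    · simp only [pvStepA, if_neg hc]
      by_cases e2 : r = 2
      · subst e2
        rw [show pvBump (pvD a b c) 2 = pvD (a + 1) b c from rfl]
        rw [ih 0 (a + 1) b c (by omega)]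
        simp [pvRunsP, hc]
        ring_nf
      by_cases e3 : r = 3
      · subst e3
        rw [show pvBump (pvD a b c) 3 = pvD a (b + 1) c from rfl]
        rw [ih 0 a (b + 1) c (by omega)]
        simp [pvRunsP, hc]
        ring_nf
      by_cases e4 : r = 4
      · subst e4
        rw [show pvBump (pvD a b c) 4 = pvD a b (c + 1) from rfl]
        rw [ih 0 a b (c + 1) (by omega)]
        simp [pvRunsP, hc]
        ring_nf
      by_cases e0 : r = 0
      · subst e0
        rw [show pvBump (pvD a b c) 0 = pvD a b c from rfl]
        rw [ih 0 a b c (by omega)]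
        simp [pvRunsP, hc]
      · rw [pvBump_D a b c r hr]
        simp only [if_neg e2, if_neg e3, if_neg e4]
        rw [ih 0 a b c (by omega)]
        have b2 : (r == (2:Int)) = false := by simpa using e2
        have b3 : (r == (3:Int)) = false := by simpa using e3
        have b4 : (r == (4:Int)) = false := by simpa using e4
        simp [pvRunsP, hc, e0, List.count_cons, b2, b3, b4]

-- over a list of lines
lemma pv_linesA (p : String) : ∀ (ls : List (List Char)) (a b c : Int),
    ls.foldl (pvLineF p) (pvD a b c)
      = pvD (a + (((ls.map (pvRunsP p 0)).flatten).count 2 : Int))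
          (b + (((ls.map (pvRunsP p 0)).flatten).count 3 : Int))
          (c + (((ls.map (pvRunsP p 0)).flatten).count 4 : Int)) := by
  intro ls
  induction ls with
  | nil => intro a b c; simp
  | cons l ls ih =>
    intro a b c
    simp only [List.foldl_cons, List.map_cons, List.flatten_cons]
    rw [show pvLineF p (pvD a b c) l
        = pvBump (l.foldl (pvStepA p) (pvD a b c, 0)).1 (l.foldl (pvStepA p) (pvD a b c, 0)).2 from rfl]
    rw [pv_lineA p l 0 a b c (by omega), ih]
    simp only [List.count_append]
    push_cast
    ring_nf

-- B's run extraction computes pvRunsP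
lemma pv_runsB (p : String) : ∀ (cs : List Char) (acc : List Int) (r : Int),
    (if (cs.foldl (pvStepB p) (acc, r)).2 ≠ 0 then
        (cs.foldl (pvStepB p) (acc, r)).1 ++ [(cs.foldl (pvStepB p) (acc, r)).2]
      else (cs.foldl (pvStepB p) (acc, r)).1)
      = acc ++ pvRunsP p r cs := by
  intro cs
  induction cs with
  | nil =>
    intro acc r
    by_cases e : r = 0 <;> simp [pvRunsP, e]
  | cons c0 cs ih =>
    intro acc r
    simp only [List.foldl_cons]
    by_cases hc : pvEq c0 p
    · simp only [pvStepB, if_pos hc]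
      rw [ih acc (r + 1)]
      simp [pvRunsP, hc]
    · by_cases e : r = 0
      · subst e
        simp only [pvStepB, if_neg hc, if_neg (by simp : ¬ (0:Int) ≠ 0)]
        rw [ih acc 0]
        simp [pvRunsP, hc]
      · simp only [pvStepB, if_neg hc, if_pos e]
        rw [ih (acc ++ [r]) 0]
        simp [pvRunsP, hc, e]

lemma pv_allRunsB (p : String) : ∀ (ls : List (List Char)) (acc : List Int),
    ls.foldl (pvRunF p) acc = acc ++ (ls.map (pvRunsP p 0)).flatten := by
  intro ls
  induction ls with
  | nil => intro acc; simp
  | cons l ls ih =>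
    intro acc
    simp only [List.foldl_cons, List.map_cons, List.flatten_cons]
    rw [show pvRunF p acc l
        = (if (l.foldl (pvStepB p) (acc, 0)).2 ≠ 0 then
            (l.foldl (pvStepB p) (acc, 0)).1 ++ [(l.foldl (pvStepB p) (acc, 0)).2]
          else (l.foldl (pvStepB p) (acc, 0)).1) from rfl]
    rw [pv_runsB p l acc 0, ih]
    simp

-- A's interleaved diagonal count is the scan of the materialized diagonal
lemma pv_diagF_eq (g : List (List Char)) (p : String) (w : Nat) : ∀ (fuel i j : Nat) st,
    pvDiagCntF g p w fuel i j st = (pvDiagColF g w fuel i j).foldl (pvStepA p) st := by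
  intro fuel
  induction fuel with
  | zero => intro i j st; simp [pvDiagCntF, pvDiagColF]
  | succ n ih =>
    intro i j st
    simp only [pvDiagCntF, pvDiagColF]
    split
    · rw [ih]; simp
    · simp

lemma pv_diagB_eq (g : List (List Char)) (p : String) : ∀ (fuel : Nat) (i : Nat) (j : Int) st,
    pvDiagCntB g p fuel i j st = (pvDiagColB g fuel i j).foldl (pvStepA p) st := by
  intro fuel
  induction fuel with
  | zero => intro i j st; simp [pvDiagCntB, pvDiagColB]
  | succ n ih =>
    intro i j st
    simp only [pvDiagCntB, pvDiagColB]
    split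
    · rw [ih]; simp
    · simp

-- generic shape of the 12-iteration loops
lemma pv_fold_fst {σ δ : Type} (u : σ → σ) (F : σ × δ → δ) (n : Nat) (s : σ) (d : δ) :
    ((List.range n).foldl (fun st (_ : Nat) => (u st.1, F st)) (s, d)).1 = u^[n] s := by
  induction n generalizing d with
  | zero => simp
  | succ n ih =>
    rw [List.range_succ, List.foldl_append, List.foldl_cons, List.foldl_nil,
      Function.iterate_succ_apply']
    rw [← ih d]

lemma pv_fold_lines {σ β : Type} (u : σ → σ) (m : σ → β) (n : Nat) (s : σ) (ls : List β) :
    ((List.range n).foldl (fun st (_ : Nat) => (u st.1, st.2 ++ [m st.1])) (s, ls)).2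
      = ls ++ ((List.range n).foldl (fun st (_ : Nat) => (u st.1, st.2 ++ [m st.1])) (s, [])).2 := by
  induction n with
  | zero => simp
  | succ n ih =>
    rw [List.range_succ, List.foldl_append, List.foldl_append, List.foldl_cons, List.foldl_cons,
      List.foldl_nil, List.foldl_nil]
    rw [ih, pv_fold_fst u (fun st => st.2 ++ [m st.1]) n s ls,
      pv_fold_fst u (fun st => st.2 ++ [m st.1]) n s []]
    simp

lemma pv_fold_pair {σ β δ : Type} (u : σ → σ) (m : σ → β) (f : δ → β → δ) (n : Nat) (s : σ) (d : δ) :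
    ((List.range n).foldl (fun st (_ : Nat) => (u st.1, f st.2 (m st.1))) (s, d)).2
      = (((List.range n).foldl (fun st (_ : Nat) => (u st.1, st.2 ++ [m st.1])) (s, [])).2).foldl f d := by
  induction n generalizing d with
  | zero => simp
  | succ n ih =>
    rw [List.range_succ, List.foldl_append, List.foldl_append, List.foldl_cons, List.foldl_cons,
      List.foldl_nil, List.foldl_nil]
    rw [ih d, pv_fold_fst u (fun st => f st.2 (m st.1)) n s d,
      pv_fold_fst u (fun st => st.2 ++ [m st.1]) n s []]
    simp [List.foldl_append]

-- the main equivalence, unconditionally on the (total) ports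
lemma pv_main (grid : List String) (p : String) :
    basic_get_nums_in_a_row grid p = basic_get_nums_in_a_row_alt grid p := by
  unfold basic_get_nums_in_a_row basic_get_nums_in_a_row_alt
  dsimp only
  set g := List.map String.toList grid with hg
  set w := (g.headD []).length with hw
  -- name A's down-right diagonal step
  rw [show (fun (st : (Nat × Nat) × PySem.Dict String Int) (_x : Nat) =>
        (if 1 ≤ st.1.1 then (st.1.1 - 1, st.1.2) else (st.1.1, st.1.2 + 1),
          pvBump (pvDiagCntF g p w g.length st.1.1 st.1.2 (st.2, 0)).1
            (pvDiagCntF g p w g.length st.1.1 st.1.2 (st.2, 0)).2))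
      = (fun st (_ : Nat) => (pvUF st.1, pvLineF p st.2 (pvMF g w st.1))) from
        funext fun st => funext fun _ => by
          simp only [pvUF, pvLineF, pvMF, pv_diagF_eq]]
  -- name A's down-left diagonal step
  rw [show (fun (st : (Nat × Nat) × PySem.Dict String Int) (_x : Nat) =>
        (if st.1.2 + 1 < w then (st.1.1, st.1.2 + 1) else (st.1.1 + 1, st.1.2),
          pvBump (pvDiagCntB g p g.length st.1.1 (st.1.2 : Int) (st.2, 0)).1
            (pvDiagCntB g p g.length st.1.1 (st.1.2 : Int) (st.2, 0)).2))
      = (fun st (_ : Nat) => (pvUB w st.1, pvLineF p st.2 (pvMB g st.1))) from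
        funext fun st => funext fun _ => by
          simp only [pvUB, pvLineF, pvMB, pv_diagB_eq]]
  -- A's column scan is the scan of the materialized column
  rw [show (fun (d : PySem.Dict String Int) (i : Nat) =>
        pvBump ((List.range g.length).foldl (fun st j => pvStepA p st ((g.getD j []).getD i default)) (d, 0)).1
          ((List.range g.length).foldl (fun st j => pvStepA p st ((g.getD j []).getD i default)) (d, 0)).2)
      = (fun d i => pvLineF p d (pvColL g i)) from
        funext fun d => funext fun i => by
          simp only [pvLineF, pvColL, List.foldl_map]]
  -- A's row scan body is pvLineF
  rw [show (fun (d : PySem.Dict String Int) (row : List Char) =>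
        pvBump (row.foldl (pvStepA p) (d, 0)).1 (row.foldl (pvStepA p) (d, 0)).2)
      = pvLineF p from rfl]
  -- name B's builders
  rw [show (fun (ls : List (List Char)) (i : Nat) =>
        ls ++ [(List.range g.length).map (fun j => (g.getD j []).getD i default)])
      = (fun ls i => ls ++ [pvColL g i]) from rfl]
  rw [show (fun (st : (Nat × Nat) × List (List Char)) (_x : Nat) =>
        (if 1 ≤ st.1.1 then (st.1.1 - 1, st.1.2) else (st.1.1, st.1.2 + 1),
          st.2 ++ [pvDiagColF g w g.length st.1.1 st.1.2]))
      = (fun st (_ : Nat) => (pvUF st.1, st.2 ++ [pvMF g w st.1])) from rfl]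
  rw [show (fun (st : (Nat × Nat) × List (List Char)) (_x : Nat) =>
        (if st.1.2 + 1 < w then (st.1.1, st.1.2 + 1) else (st.1.1 + 1, st.1.2),
          st.2 ++ [pvDiagColB g g.length st.1.1 (st.1.2 : Int)]))
      = (fun st (_ : Nat) => (pvUB w st.1, st.2 ++ [pvMB g st.1])) from rfl]
  rw [show (fun (acc : List Int) (line : List Char) =>
        if (line.foldl (pvStepB p) (acc, 0)).2 ≠ 0 then
          (line.foldl (pvStepB p) (acc, 0)).1 ++ [(line.foldl (pvStepB p) (acc, 0)).2]
        else (line.foldl (pvStepB p) (acc, 0)).1)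
      = pvRunF p from rfl]
  -- collapse B's line accumulators
  rw [PySem.List.foldl_append_singleton_eq_map (pvColL g) (List.range w) g]
  rw [pv_fold_lines pvUF (pvMF g w) 12 (5, 0)]
  rw [pv_fold_lines (pvUB w) (pvMB g) 12 (0, 0)]
  rw [pv_allRunsB p]
  -- collapse the 12-iteration loops on A's side
  rw [pv_fold_pair pvUF (pvMF g w) (pvLineF p) 12 (5, 0),
      pv_fold_pair (pvUB w) (pvMB g) (pvLineF p) 12 (0, 0)]
  -- fuse A's four passes into one fold over all lines
  rw [← List.foldl_map (f := pvColL g) (g := pvLineF p)]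
  rw [← List.foldl_append, ← List.foldl_append, ← List.foldl_append]
  rw [show PySem.Dict.mk [("2", (0:Int)), ("3", 0), ("4", 0)] = pvD 0 0 0 from rfl]
  rw [pv_linesA p]
  simp only [pvD, List.nil_append, List.append_assoc, zero_add]

-- ===== VERDICT (by name: the statement is the Claim_ definition above) =====
theorem basic_get_nums_in_a_row_spec : Claim_equal_basic_get_nums_in_a_row := by
  intro grid p _ _
  unfold Spec_basic_get_nums_in_a_row
  exact pv_main grid p
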